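-- pv_equiv track=rewrite | github.com/SharkoStepan/AOIS | lab3/log_parser.py | is_valid_symbols
-- ===== SOURCE A (Python) =====
-- def is_valid_symbols(s: str) -> bool:
--     i = 0
--     while i < len(s):
--         if s[i] == '-':
--             if i + 1 >= len(s) or s[i + 1] != '>':
--                 return False
--             i += 2
--         elif s[i] in "abcde&|!~()":
--             i += 1
--         else:
--             return False
--     return True
-- ===== SOURCE B (Python) =====
-- def is_valid_symbols(s: str) -> bool:
--     return all(c in "abcde&|!~()" for c in s.replace("->", ""))
-- ===== Notes on version B (the rewrite author's own statement) =====
-- stated objective: idiomatic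
-- what changed: Replaced the manual index-advancing scanner that special-cases the two-character arrow token with a one-liner that deletes every arrow token via str.replace and then checks membership of each remaining character in the allowed set.
import Mathlib
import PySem

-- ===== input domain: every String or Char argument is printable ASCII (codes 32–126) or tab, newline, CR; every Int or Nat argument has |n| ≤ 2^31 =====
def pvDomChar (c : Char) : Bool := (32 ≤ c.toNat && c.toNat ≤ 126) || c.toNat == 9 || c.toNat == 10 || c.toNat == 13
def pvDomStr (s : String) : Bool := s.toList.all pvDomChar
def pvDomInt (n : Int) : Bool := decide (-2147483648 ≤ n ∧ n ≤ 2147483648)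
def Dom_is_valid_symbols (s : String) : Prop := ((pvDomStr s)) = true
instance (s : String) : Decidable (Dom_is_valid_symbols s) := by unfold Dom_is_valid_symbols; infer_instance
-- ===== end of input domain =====

-- B replaces A's index-advancing scanner by deleting every "->" with str.replace and
-- checking the leftover characters against the allowed set (idiomatic one-liner, same cost).

-- ===== PORT A =====
-- A's while-loop over index i, transliterated as structural recursion over the remaining characters:
-- '-' must be followed by '>' (consume two), any char of "abcde&|!~()" consumes one, anything else → False.
def pvScanA : List Char → Bool
  | [] => true
  | c :: rest =>
    if c = '-' then
      match rest with
      | [] => false                                   -- i + 1 >= len(s)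
      | c2 :: rest2 => if c2 ≠ '>' then false else pvScanA rest2
    else if PySem.Chars.isIn [c] "abcde&|!~()".toList then pvScanA rest
    else false

def is_valid_symbols (s : String) : Bool := pvScanA s.toList

-- ===== PORT B =====
def is_valid_symbols_alt (s : String) : Bool :=
  (PySem.Str.replace s "->" "").toList.all
    (fun c => PySem.Chars.isIn [c] "abcde&|!~()".toList)

-- ===== PRECONDITION & SPEC =====
def Spec_is_valid_symbols (s : String) (out : Bool) : Prop := out = is_valid_symbols_alt s
instance (s : String) (out : Bool) : Decidable (Spec_is_valid_symbols s out) := by unfold Spec_is_valid_symbols; infer_instance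

-- ===== CLAIM (what is proved, stated in full; the proofs are below) =====
def Claim_equal_is_valid_symbols : Prop := ∀ (s : String), Dom_is_valid_symbols s → Spec_is_valid_symbols s (is_valid_symbols s)

-- ===== LEMMAS AND PROOFS =====

-- simple model of leftmost non-overlapping deletion of "->"
def pvRep : List Char → List Char
  | [] => []
  | '-' :: '>' :: t => pvRep t
  | c :: t => c :: pvRep t

theorem pvGo_eq_rep : ∀ (fuel : Nat) (l acc : List Char), l.length ≤ fuel →
    PySem.Chars.replace.go ['-','>'] [] fuel l acc = acc.reverse ++ pvRep l := by
  intro fuel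
  induction fuel with
  | zero =>
    intro l acc h
    have : l = [] := by cases l <;> simp_all
    subst this
    simp [PySem.Chars.replace.go, pvRep]
  | succ n ih =>
    intro l acc h
    cases l with
    | nil => simp [PySem.Chars.replace.go, pvRep]
    | cons c t =>
      by_cases hp : (['-','>'] : List Char).isPrefixOf (c :: t) = true
      · obtain ⟨c2, t2, rfl⟩ : ∃ c2 t2, t = c2 :: t2 := by
          cases t with
          | nil => simp [List.isPrefixOf] at hp
          | cons a b => exact ⟨a, b, rfl⟩
        have hc : c = '-' ∧ c2 = '>' := by
          simp [List.isPrefixOf] at hp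
          exact ⟨hp.1.symm, hp.2.symm⟩
        obtain ⟨rfl, rfl⟩ := hc
        have hlen : t2.length ≤ n := by simp at h; omega
        simp only [PySem.Chars.replace.go, hp, if_true]
        rw [ih _ _ (by simpa using hlen)]
        simp [pvRep]
      · have hlen : t.length ≤ n := by simp at h; omega
        simp only [PySem.Chars.replace.go, hp, if_false, Bool.false_eq_true]
        rw [ih _ _ hlen]
        have hrep : pvRep (c :: t) = c :: pvRep t := by
          cases t with
          | nil =>
            by_cases h1 : c = '-'
            · subst h1; simp [pvRep]
            · simp [pvRep]
          | cons a b =>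
            by_cases h1 : c = '-'
            · by_cases h2 : a = '>'
              · exfalso; subst h1; subst h2; simp [List.isPrefixOf] at hp
              · subst h1; simp [pvRep, h2]
            · simp [pvRep, h1]
        simp [hrep]

theorem pvReplace_eq_rep (l : List Char) :
    PySem.Chars.replace l ['-','>'] [] = pvRep l := by
  simpa using pvGo_eq_rep l.length l [] (le_refl _)

theorem pvRep_all_eq_scan : ∀ l : List Char,
    ((pvRep l).all (fun c => PySem.Chars.isIn [c] "abcde&|!~()".toList)) = pvScanA l := by
  intro l
  induction l using pvRep.induct with
  | case1 => simp [pvRep, pvScanA]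
  | case2 t ih =>
    simp only [pvRep, ih]
    simp [pvScanA]
  | case3 c t h ih =>
    have hdash : PySem.Chars.isIn ['-'] ['a','b','c','d','e','&','|','!','~','(',')'] = false := by
      decide
    cases t with
    | nil =>
      by_cases h1 : c = '-'
      · subst h1; simp [pvRep, pvScanA, hdash]
      · simp [pvRep, pvScanA, h1]
    | cons a b =>
      by_cases h1 : c = '-'
      · subst h1
        have h2 : a ≠ '>' := by
          intro h2; subst h2; exact h b rfl rfl
        simp [pvRep, pvScanA, h2, hdash]
      · simp only [pvScanA, h1, if_false]
        have hrep : pvRep (c :: a :: b) = c :: pvRep (a :: b) := by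
          simp [pvRep]
        rw [hrep]
        simp only [List.all_cons, ih]
        by_cases h3 : PySem.Chars.isIn [c] "abcde&|!~()".toList = true
        · simp only [h3, if_true, Bool.true_and]
        · simp only [Bool.not_eq_true] at h3
          simp only [h3, if_false, Bool.false_and, Bool.false_eq_true]

-- ===== VERDICT (by name: the statement is the Claim_ definition above) =====
theorem is_valid_symbols_spec : Claim_equal_is_valid_symbols := by
  intro s _
  show _ = _
  unfold is_valid_symbols is_valid_symbols_alt
  rw [PySem.Str.toList_replace]
  have h2 : ("->" : String).toList = ['-','>'] := by decide
  have h3 : ("" : String).toList = [] := by decide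
  rw [h2, h3, pvReplace_eq_rep, pvRep_all_eq_scan]
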